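-- pv_equiv track=rewrite | github.com/tlofgren/sum-image | api.py | _get_preceding_replies
-- ===== SOURCE A (Python) =====
-- APP_ID = ""
--
-- def _get_preceding_replies(messages_list, target_reply_ts, max_num_preceding=5):
--     """Given a list of thread replies from the Slack API, slice a number of replies leading up and including to the target reply. Exclude past replies from this app so we don't eat our own tail.
--
--     Args:
--         messages_list (list): list of messages from conversations.replies or conversations.history
--         target_reply_ts (str): ts of the reply we want to target as the latest reply to slice.
--         max_num_preceding (int, optional): maximum number of replies from before the target one to slice out of the messages list. Defaults to 2.
--
--     Returns:
--         list: slice of the messages list with the replies preceding the target one, as well as the target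
--     """
--     replies = []
--     target_idx = 0
--     for i in range(len(messages_list) - 1, 0, -1):
--         reply = messages_list[i]
--         if reply["ts"] == target_reply_ts:
--             target_idx = i
--             replies.insert(0, reply)
--             break
--     for i in range(target_idx - 1, 0, -1):
--         reply = messages_list[i]
--         if "app_id" in reply and reply["app_id"] == APP_ID:  # don't add messages from ourselves to this list
--             continue
--         replies.insert(0, reply)
--         if len(replies) >= max_num_preceding + 1:
--             break
--     return replies
-- ===== SOURCE B (Python) =====
-- APP_ID = ""
--
-- def _get_preceding_replies(messages_list, target_reply_ts, max_num_preceding=5):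
--     """Slice out the replies leading up to (and including) the target reply,
--     skipping this app's own messages and keeping at most max_num_preceding of them."""
--     target_idx = next((i for i in range(len(messages_list) - 1, 0, -1)
--                        if messages_list[i]["ts"] == target_reply_ts), 0)
--     if target_idx == 0:
--         return []
--     preceding = [m for m in messages_list[1:target_idx] if m.get("app_id") != APP_ID]
--     if max_num_preceding > 0:
--         preceding = preceding[-max_num_preceding:]
--     else:
--         preceding = []
--     return preceding + [messages_list[target_idx]]
-- ===== Notes on version B (the rewrite author's own statement) =====
-- stated objective: simpler
-- what changed: Replaces A's backward insert(0)-with-break collection loop by a forward filter comprehension of the eligible preceding replies followed by a tail slice; the target is still located by a single backward scan (next over a reversed range). Pre_ excludes only inputs where both programs raise KeyError (a message past index 0 lacking 'ts' that the backward scan reaches before any match).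
-- intended difference: When max_num_preceding <= 0 and the target is found with at least one eligible preceding reply, A still returns that one preceding reply before the target (its cap check 'len(replies) >= max_num_preceding + 1' runs only after appending), while B returns just the target, which is what a cap of at most 0 preceding replies means. — e.g. on _get_preceding_replies([[("ts", "0")], [("ts", "1")], [("ts", "2")]], "2", 0): A returns [[("ts", "1")], [("ts", "2")]], B returns [[("ts", "2")]]
import Mathlib
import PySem

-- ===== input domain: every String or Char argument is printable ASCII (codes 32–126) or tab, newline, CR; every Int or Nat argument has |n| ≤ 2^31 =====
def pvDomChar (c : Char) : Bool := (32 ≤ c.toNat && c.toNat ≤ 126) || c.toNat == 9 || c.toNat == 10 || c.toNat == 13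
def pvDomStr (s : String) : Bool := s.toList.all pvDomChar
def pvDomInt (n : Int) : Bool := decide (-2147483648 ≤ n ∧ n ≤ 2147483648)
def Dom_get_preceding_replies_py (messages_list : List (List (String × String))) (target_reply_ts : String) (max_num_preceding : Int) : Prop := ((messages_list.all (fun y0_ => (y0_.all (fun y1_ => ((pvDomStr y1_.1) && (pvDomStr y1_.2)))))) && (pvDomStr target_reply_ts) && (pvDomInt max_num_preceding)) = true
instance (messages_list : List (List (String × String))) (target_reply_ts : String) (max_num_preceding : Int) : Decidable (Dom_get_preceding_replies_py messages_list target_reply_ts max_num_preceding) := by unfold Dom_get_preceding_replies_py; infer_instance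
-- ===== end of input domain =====

-- B replaces A's backward insert(0)/break collection by a forward filter of the
-- preceding replies plus a tail slice (objective: simpler decomposition); the target
-- is still located by one backward scan. Return value only; neither version mutates.

-- shared field access: reply["ts"] == target at index i (messages are Python dicts)
def pvTsEq (messages_list : List (List (String × String))) (target : String) (i : Int) : Bool :=
  (((PySem.Dict.mk (PySem.List.pyGetD messages_list i [])).get? "ts").getD "") == target

-- ===== PORT A =====
-- '"app_id" in reply and reply["app_id"] == APP_ID'  (APP_ID = "")
def pvASkip (reply : List (String × String)) : Bool :=
  match (PySem.Dict.mk reply).get? "app_id" with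
  | some v => v == ""
  | none => false

-- first loop: for i in range(len-1, 0, -1): … break on first match
def pvAFind (messages_list : List (List (String × String))) (target : String) :
    List Int → (List (List (String × String)) × Int)
  | [] => ([], 0)
  | i :: rest =>
    if pvTsEq messages_list target i then
      ([PySem.List.pyGetD messages_list i []], i)
    else
      pvAFind messages_list target rest

-- second loop: insert(0, reply), break when len(replies) >= max_num_preceding + 1
def pvACollect (messages_list : List (List (String × String))) (max_num_preceding : Int) :
    List Int → List (List (String × String)) → List (List (String × String))
  | [], replies => replies
  | i :: rest, replies =>
    let reply := PySem.List.pyGetD messages_list i []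
    if pvASkip reply then
      pvACollect messages_list max_num_preceding rest replies
    else
      let replies' := reply :: replies
      if max_num_preceding + 1 ≤ (replies'.length : Int) then replies'
      else pvACollect messages_list max_num_preceding rest replies'

def get_preceding_replies_py (messages_list : List (List (String × String))) (target_reply_ts : String) (max_num_preceding : Int) : List (List (String × String)) :=
  let p := pvAFind messages_list target_reply_ts
    (PySem.List.pyRange ((messages_list.length : Int) - 1) 0 (-1))
  pvACollect messages_list max_num_preceding
    (PySem.List.pyRange (p.2 - 1) 0 (-1)) p.1

-- ===== PORT B =====
def get_preceding_replies_py_alt (messages_list : List (List (String × String))) (target_reply_ts : String) (max_num_preceding : Int) : List (List (String × String)) :=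
  -- target_idx = next((i for i in range(len-1, 0, -1) if messages_list[i]["ts"] == target), 0)
  let target_idx := ((PySem.List.pyRange ((messages_list.length : Int) - 1) 0 (-1)).find?
    (fun i => pvTsEq messages_list target_reply_ts i)).getD 0
  if target_idx = 0 then []
  else
    -- [m for m in messages_list[1:target_idx] if m.get("app_id") != APP_ID]
    let preceding := (PySem.List.slice messages_list (some 1) (some target_idx)).filter
      (fun m => decide (((PySem.Dict.mk m).get? "app_id") ≠ some ""))
    let kept := if 0 < max_num_preceding then
        PySem.List.slice preceding (some (-max_num_preceding)) none
      else []
    kept ++ [PySem.List.pyGetD messages_list target_idx []]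

-- ===== PRECONDITION & SPEC =====
-- Pre_ excludes exactly the inputs on which BOTH programs raise KeyError: some message
-- past index 0 lacks a "ts" key and the backward scan reaches it before any match.
def Pre_get_preceding_replies_py (messages_list : List (List (String × String))) (target_reply_ts : String) (max_num_preceding : Int) : Prop :=
  ∀ i ∈ List.range messages_list.length, 1 ≤ i →
    ((PySem.Dict.mk (messages_list.getD i [])).get? "ts") = none →
    ∃ j ∈ List.range messages_list.length, i < j ∧
      (((PySem.Dict.mk (messages_list.getD j [])).get? "ts") = none ∨
        pvTsEq messages_list target_reply_ts (j : Int) = true)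
instance (messages_list : List (List (String × String))) (target_reply_ts : String) (max_num_preceding : Int) : Decidable (Pre_get_preceding_replies_py messages_list target_reply_ts max_num_preceding) := by unfold Pre_get_preceding_replies_py; infer_instance

def pvWitness_get_preceding_replies_py : (List (List (String × String))) × String × Int :=
  ([[("ts", "0")], [("ts", "1"), ("app_id", "x")], [("ts", "2")]], "2", 5)

-- On inputs with max_num_preceding ≤ 0 where the target is found and at least one
-- eligible preceding reply exists, A still returns one preceding reply before the target
-- (its cap check runs only after appending), while B returns just the target, which is
-- what a cap of at most 0 preceding replies means.
def D_get_preceding_replies_py (messages_list : List (List (String × String))) (target_reply_ts : String) (max_num_preceding : Int) : Prop :=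
  max_num_preceding ≤ 0 ∧
  ∃ t ∈ List.range messages_list.length, 1 ≤ t ∧
    pvTsEq messages_list target_reply_ts (t : Int) = true ∧
    (∀ j ∈ List.range messages_list.length, t < j →
      pvTsEq messages_list target_reply_ts (j : Int) = false) ∧
    ∃ p ∈ List.range messages_list.length, 1 ≤ p ∧ p < t ∧
      ((PySem.Dict.mk (messages_list.getD p [])).get? "app_id") ≠ some ""
instance (messages_list : List (List (String × String))) (target_reply_ts : String) (max_num_preceding : Int) : Decidable (D_get_preceding_replies_py messages_list target_reply_ts max_num_preceding) := by unfold D_get_preceding_replies_py; infer_instance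

def Spec_get_preceding_replies_py (messages_list : List (List (String × String))) (target_reply_ts : String) (max_num_preceding : Int) (out : List (List (String × String))) : Prop := ¬ D_get_preceding_replies_py messages_list target_reply_ts max_num_preceding → out = get_preceding_replies_py_alt messages_list target_reply_ts max_num_preceding
instance (messages_list : List (List (String × String))) (target_reply_ts : String) (max_num_preceding : Int) (out : List (List (String × String))) : Decidable (Spec_get_preceding_replies_py messages_list target_reply_ts max_num_preceding out) := by unfold Spec_get_preceding_replies_py; infer_instance

def pvDiffWitness_get_preceding_replies_py : (List (List (String × String))) × String × Int :=
  ([[("ts", "0")], [("ts", "1")], [("ts", "2")]], "2", 0)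
def pvDiffWitnessOut_get_preceding_replies_py : (List (List (String × String))) × (List (List (String × String))) :=
  ([[("ts", "1")], [("ts", "2")]], [[("ts", "2")]])

-- ===== CLAIM (what is proved, stated in full; the proofs are below) =====
def Claim_unchanged_get_preceding_replies_py : Prop := ∀ (messages_list : List (List (String × String))) (target_reply_ts : String) (max_num_preceding : Int), Dom_get_preceding_replies_py messages_list target_reply_ts max_num_preceding → Pre_get_preceding_replies_py messages_list target_reply_ts max_num_preceding → Spec_get_preceding_replies_py messages_list target_reply_ts max_num_preceding (get_preceding_replies_py messages_list target_reply_ts max_num_preceding)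
def Claim_changed_get_preceding_replies_py : Prop := Dom_get_preceding_replies_py (pvDiffWitness_get_preceding_replies_py.1) (pvDiffWitness_get_preceding_replies_py.2.1) (pvDiffWitness_get_preceding_replies_py.2.2) ∧ Pre_get_preceding_replies_py (pvDiffWitness_get_preceding_replies_py.1) (pvDiffWitness_get_preceding_replies_py.2.1) (pvDiffWitness_get_preceding_replies_py.2.2) ∧ D_get_preceding_replies_py (pvDiffWitness_get_preceding_replies_py.1) (pvDiffWitness_get_preceding_replies_py.2.1) (pvDiffWitness_get_preceding_replies_py.2.2) ∧ get_preceding_replies_py (pvDiffWitness_get_preceding_replies_py.1) (pvDiffWitness_get_preceding_replies_py.2.1) (pvDiffWitness_get_preceding_replies_py.2.2) = pvDiffWitnessOut_get_preceding_replies_py.1 ∧ get_preceding_replies_py_alt (pvDiffWitness_get_preceding_replies_py.1) (pvDiffWitness_get_preceding_replies_py.2.1) (pvDiffWitness_get_preceding_replies_py.2.2) = pvDiffWitnessOut_get_preceding_replies_py.2 ∧ pvDiffWitnessOut_get_preceding_replies_py.1 ≠ pvDiffWitnessOut_get_preceding_replies_py.2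
def Claim_exact_get_preceding_replies_py : Prop := ∀ (messages_list : List (List (String × String))) (target_reply_ts : String) (max_num_preceding : Int), Dom_get_preceding_replies_py messages_list target_reply_ts max_num_preceding → Pre_get_preceding_replies_py messages_list target_reply_ts max_num_preceding → D_get_preceding_replies_py messages_list target_reply_ts max_num_preceding → get_preceding_replies_py messages_list target_reply_ts max_num_preceding ≠ get_preceding_replies_py_alt messages_list target_reply_ts max_num_preceding

-- ===== LEMMAS AND PROOFS =====

-- the forward filtered list of preceding replies (proof-only normal form)
def pvPrec (messages_list : List (List (String × String))) (ti : Int) : List (List (String × String)) :=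
  ((messages_list.drop 1).take (ti - 1).toNat).filter
    (fun m => decide (((PySem.Dict.mk m).get? "app_id") ≠ some ""))

lemma pvAFind_eq_find? (messages_list : List (List (String × String))) (target : String) :
    ∀ r : List Int, pvAFind messages_list target r =
      (match r.find? (fun i => pvTsEq messages_list target i) with
       | none => ([], 0)
       | some i => ([PySem.List.pyGetD messages_list i []], i)) := by
  intro r
  induction r with
  | nil => simp [pvAFind]
  | cons i rest ih =>
      by_cases h : pvTsEq messages_list target i
      · simp [pvAFind, h, List.find?_cons]
      · simp [pvAFind, h, List.find?_cons, ih]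

lemma pvASkip_eq (m : List (String × String)) :
    pvASkip m = !(decide (((PySem.Dict.mk m).get? "app_id") ≠ some "")) := by
  unfold pvASkip
  cases h : (PySem.Dict.mk m).get? "app_id" with
  | none => simp
  | some v => by_cases hv : v = "" <;> simp [hv]

-- A's capped backward collection is a tail slice of the (reversed) forward filtered list.
lemma pvACollect_eq (messages_list : List (List (String × String))) (maxp : Int) :
    ∀ (rs : List Int) (acc : List (List (String × String))),
      pvACollect messages_list maxp rs acc =
        (let G := ((rs.map (fun i => PySem.List.pyGetD messages_list i [])).filter
            (fun m => !pvASkip m)).reverse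
         let R := max ((maxp + 1).toNat - acc.length) 1
         G.drop (G.length - R) ++ acc) := by
  intro rs
  induction rs with
  | nil => intro acc; simp [pvACollect]
  | cons i rest ih =>
      intro acc
      set x := PySem.List.pyGetD messages_list i [] with hx
      set F := (rest.map (fun i => PySem.List.pyGetD messages_list i [])).filter
          (fun m => !pvASkip m) with hF
      by_cases hs : pvASkip x = true
      · simp only [pvACollect, ← hx, ← hF, hs, if_true, List.map_cons, List.filter_cons,
          Bool.not_eq_true', Bool.true_eq_false, if_false]
        exact ih acc
      · have hs' : pvASkip x = false := by simpa using hs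
        simp only [pvACollect, ← hx, ← hF, hs', Bool.false_eq_true, if_false,
          List.map_cons, List.filter_cons, Bool.not_eq_true', if_true, List.reverse_cons]
        by_cases hb : maxp + 1 ≤ ((x :: acc).length : Int)
        · simp only [hb, if_true]
          have hR : max ((maxp + 1).toNat - acc.length) 1 = 1 := by
            simp only [List.length_cons] at hb; omega
          rw [hR]
          have hlen : (F.reverse ++ [x]).length - 1 = F.reverse.length := by
            simp
          rw [hlen, List.drop_left]
          rfl
        · simp only [hb, if_false]
          rw [ih (x :: acc)]
          simp only [List.length_cons] at hb ⊢
          have hR : max ((maxp + 1).toNat - (acc.length + 1)) 1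
              = max ((maxp + 1).toNat - acc.length) 1 - 1 := by omega
          rw [hR]
          set R := max ((maxp + 1).toNat - acc.length) 1 with hRdef
          have hR2 : 2 ≤ R := by omega
          have hlen2 : (F.reverse ++ [x]).length - R = F.reverse.length - (R - 1) := by
            simp; omega
          rw [hlen2]
          have hle : F.reverse.length - (R - 1) ≤ F.reverse.length := by omega
          rw [List.drop_append_of_le_length hle]
          simp

-- find? on the reverse of a strictly increasing list = the LAST satisfying element
lemma find?_reverse_last {P : Int → Bool} :
    ∀ l : List Int, l.Pairwise (· < ·) → ∀ t : Int,
      l.reverse.find? P = some t →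
      t ∈ l ∧ P t = true ∧ ∀ j ∈ l, t < j → P j = false := by
  intro l
  induction l with
  | nil => intro _ t h; simp at h
  | cons a l ih =>
      intro hpw t h
      have hpw' := (List.pairwise_cons.1 hpw)
      rw [List.reverse_cons, List.find?_append] at h
      cases hrev : l.reverse.find? P with
      | some u =>
          rw [hrev] at h
          simp at h
          subst h
          obtain ⟨hm, hp, hlast⟩ := ih hpw'.2 u hrev
          refine ⟨List.mem_cons_of_mem _ hm, hp, ?_⟩
          intro j hj hlt
          rcases List.mem_cons.1 hj with rfl | hj'
          · exact absurd (hpw'.1 u hm) (by omega)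
          · exact hlast j hj' hlt
      | none =>
          rw [hrev] at h
          simp only [Option.none_or] at h
          have hnone : ∀ j ∈ l, P j = false := by
            intro j hj
            have := List.find?_eq_none.1 hrev j (by simpa using hj)
            simpa using this
          by_cases hpa : P a
          · simp [List.find?_cons, hpa] at h
            subst h
            refine ⟨List.mem_cons_self, hpa, ?_⟩
            intro j hj hlt
            rcases List.mem_cons.1 hj with rfl | hj'
            · omega
            · exact hnone j hj'
          · simp [List.find?_cons, hpa] at h
  
lemma find?_reverse_of_last {P : Int → Bool} :
    ∀ l : List Int, l.Pairwise (· < ·) → ∀ t : Int,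
      t ∈ l → P t = true → (∀ j ∈ l, t < j → P j = false) →
      l.reverse.find? P = some t := by
  intro l
  induction l with
  | nil => intro _ t h; simp at h
  | cons a l ih =>
      intro hpw t hm hp hlast
      have hpw' := (List.pairwise_cons.1 hpw)
      rw [List.reverse_cons, List.find?_append]
      rcases List.mem_cons.1 hm with rfl | hm'
      · have hnone : l.reverse.find? P = none := by
          rw [List.find?_eq_none]
          intro j hj
          have hj' : j ∈ l := by simpa using hj
          have := hlast j (List.mem_cons_of_mem _ hj') (hpw'.1 j hj')
          simp [this]
        rw [hnone]
        simp [List.find?_cons, hp]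
      · have := ih hpw'.2 t hm' hp (fun j hj hlt => hlast j (List.mem_cons_of_mem _ hj) hlt)
        rw [this]
        rfl

-- the scanned index list is the reverse of the increasing range 1..len-1
lemma pvRange_rev (n : Int) :
    PySem.List.pyRange (n - 1) 0 (-1) = (PySem.List.pyRange 1 n 1).reverse := by
  rw [PySem.List.pyRange_neg_one_eq_reverse]; norm_num

-- normal form of port A once the target index is found
lemma pvA_eq (messages_list : List (List (String × String))) (target : String) (maxp ti : Int)
    (hfind : (PySem.List.pyRange ((messages_list.length : Int) - 1) 0 (-1)).find?
      (fun i => pvTsEq messages_list target i) = some ti)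
    (h1 : 1 ≤ ti) (h2 : ti < (messages_list.length : Int)) :
    get_preceding_replies_py messages_list target maxp =
      (pvPrec messages_list ti).drop
        ((pvPrec messages_list ti).length - max ((maxp + 1).toNat - 1) 1)
      ++ [PySem.List.pyGetD messages_list ti []] := by
  unfold get_preceding_replies_py
  rw [pvAFind_eq_find?, hfind]
  simp only
  rw [pvACollect_eq]
  simp only [List.length_cons, List.length_nil]
  rw [pvRange_rev ti, List.map_reverse, List.filter_reverse, List.reverse_reverse]
  have hmapfull : (PySem.List.pyRange 1 ((messages_list.length : Int)) 1).map
      (fun j => PySem.List.pyGetD messages_list j []) = messages_list.drop 1 := by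
    simpa using PySem.List.map_pyGetD_pyRange' (xs := messages_list) (a := 1) (d := []) (by omega)
  have hsplit : PySem.List.pyRange 1 ((messages_list.length : Int)) 1
      = PySem.List.pyRange 1 ti 1 ++ PySem.List.pyRange ti ((messages_list.length : Int)) 1 :=
    PySem.List.pyRange_one_append 1 ti _ h1 (le_of_lt h2)
  have hmappref : (PySem.List.pyRange 1 ti 1).map (fun j => PySem.List.pyGetD messages_list j [])
      = (messages_list.drop 1).take (ti - 1).toNat := by
    have hfull := hmapfull
    rw [hsplit, List.map_append] at hfull
    have h2' := congrArg
      (List.take ((PySem.List.pyRange 1 ti 1).map (fun j => PySem.List.pyGetD messages_list j [])).length) hfull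
    rw [List.take_left] at h2'
    rw [h2']
    simp [PySem.List.length_pyRange_one]
  rw [hmappref]
  have hfilter : ((messages_list.drop 1).take (ti - 1).toNat).filter (fun m => !pvASkip m)
      = ((messages_list.drop 1).take (ti - 1).toNat).filter
          (fun m => decide (((PySem.Dict.mk m).get? "app_id") ≠ some "")) :=
    List.filter_congr (fun m _ => by rw [pvASkip_eq]; simp)
  rw [hfilter]
  unfold pvPrec
  norm_num

-- normal form of port B once the target index is found
lemma pvB_eq (messages_list : List (List (String × String))) (target : String) (maxp ti : Int)
    (hfind : (PySem.List.pyRange ((messages_list.length : Int) - 1) 0 (-1)).find?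
      (fun i => pvTsEq messages_list target i) = some ti)
    (h1 : 1 ≤ ti) (h2 : ti < (messages_list.length : Int)) :
    get_preceding_replies_py_alt messages_list target maxp =
      (if 0 < maxp then
        (pvPrec messages_list ti).drop ((pvPrec messages_list ti).length - maxp.toNat)
      else [])
      ++ [PySem.List.pyGetD messages_list ti []] := by
  unfold get_preceding_replies_py_alt
  rw [hfind]
  simp only [Option.getD_some]
  rw [if_neg (by omega : ¬ ti = 0)]
  have hslice : PySem.List.slice messages_list (some 1) (some ti)
      = (messages_list.drop 1).take (ti - 1).toNat := by
    rw [PySem.List.slice_toNat messages_list (by omega) (by omega : (0:Int) ≤ ti)]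
    congr 1
    omega
  rw [hslice]
  congr 1
  by_cases hpos : 0 < maxp
  · rw [if_pos hpos, if_pos hpos]
    have hc : -maxp = -((maxp.toNat : Nat) : Int) := by omega
    rw [hc, PySem.List.slice_from_neg_natCast _ _ (by omega)]
    rfl
  · rw [if_neg hpos, if_neg hpos]

-- the filtered preceding list is nonempty iff an eligible preceding index exists
lemma pvPrec_ne_nil_exists (messages_list : List (List (String × String))) (ti : Int)
    (h2 : ti < (messages_list.length : Int))
    (h : pvPrec messages_list ti ≠ []) :
    ∃ p, p < messages_list.length ∧ 1 ≤ p ∧ (p : Int) < ti ∧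
      ((PySem.Dict.mk (messages_list.getD p [])).get? "app_id") ≠ some "" := by
  unfold pvPrec at h
  rcases List.exists_mem_of_ne_nil _ h with ⟨m, hm⟩
  rw [List.mem_filter] at hm
  obtain ⟨hmem, hpred⟩ := hm
  rcases List.mem_iff_getElem.1 hmem with ⟨k, hk, hget⟩
  have hk' : k < (ti - 1).toNat := lt_of_lt_of_le hk (by simp [List.length_take])
  have hklen : k + 1 < messages_list.length := by
    have := hk
    simp [List.length_take, List.length_drop] at this
    omega
  refine ⟨k + 1, hklen, by omega, by omega, ?_⟩
  have hel : messages_list.getD (k + 1) [] = m := by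
    rw [List.getD_eq_getElem _ _ hklen, ← hget]
    rw [List.getElem_take, List.getElem_drop]
    simp [Nat.add_comm]
  rw [hel]
  simpa using hpred

lemma pvPrec_ne_nil_of (messages_list : List (List (String × String))) (ti : Int) (p : Nat)
    (hplen : p < messages_list.length) (hp1 : 1 ≤ p) (hpt : (p : Int) < ti)
    (hel : ((PySem.Dict.mk (messages_list.getD p [])).get? "app_id") ≠ some "") :
    pvPrec messages_list ti ≠ [] := by
  unfold pvPrec
  intro hnil
  have hmem : messages_list.getD p [] ∈ (messages_list.drop 1).take (ti - 1).toNat := by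
    rw [List.getD_eq_getElem _ _ hplen]
    rw [List.mem_iff_getElem]
    refine ⟨p - 1, ?_, ?_⟩
    · simp [List.length_take, List.length_drop]
      omega
    · rw [List.getElem_take, List.getElem_drop]
      congr 1
      omega
  have hmf : messages_list.getD p [] ∈ ((messages_list.drop 1).take (ti - 1).toNat).filter
      (fun m => decide (((PySem.Dict.mk m).get? "app_id") ≠ some "")) := by
    rw [List.mem_filter]
    exact ⟨hmem, by simpa using hel⟩
  rw [hnil] at hmf
  simp at hmf

-- bounds of the found index
lemma pvFind_bounds (messages_list : List (List (String × String))) (target : String) (ti : Int)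
    (hfind : (PySem.List.pyRange ((messages_list.length : Int) - 1) 0 (-1)).find?
      (fun i => pvTsEq messages_list target i) = some ti) :
    1 ≤ ti ∧ ti < (messages_list.length : Int) := by
  have hmem := List.mem_of_find?_eq_some hfind
  rw [PySem.List.mem_pyRange_neg_one] at hmem
  omega

-- ===== VERDICT (by name: the statements are the Claim_ definitions above) =====
theorem get_preceding_replies_py_spec : Claim_unchanged_get_preceding_replies_py := by
  intro msgs t maxp hdom hpre hD
  show get_preceding_replies_py msgs t maxp = get_preceding_replies_py_alt msgs t maxp
  cases hfind : (PySem.List.pyRange ((msgs.length : Int) - 1) 0 (-1)).find?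
      (fun i => pvTsEq msgs t i) with
  | none =>
      unfold get_preceding_replies_py
      rw [pvAFind_eq_find?, hfind]
      simp only
      have hnil : PySem.List.pyRange ((0:Int) - 1) 0 (-1) = [] :=
        PySem.List.pyRange_neg_one_eq_nil (by omega)
      rw [hnil]
      unfold get_preceding_replies_py_alt
      rw [hfind]
      simp [pvACollect]
  | some ti =>
      obtain ⟨h1, h2⟩ := pvFind_bounds msgs t ti hfind
      rw [pvA_eq msgs t maxp ti hfind h1 h2, pvB_eq msgs t maxp ti hfind h1 h2]
      congr 1
      by_cases hpos : 0 < maxp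
      · rw [if_pos hpos]
        congr 1
        omega
      · rw [if_neg hpos]
        have hP : pvPrec msgs ti = [] := by
          by_contra hne
          rcases pvPrec_ne_nil_exists msgs ti h2 hne with ⟨p, hplen, hp1, hpt, hel⟩
          apply hD
          refine ⟨by omega, ti.toNat, ?_, by omega, ?_, ?_, p, ?_, hp1, by omega, hel⟩
          · rw [List.mem_range]; omega
          · rw [show ((ti.toNat : Nat) : Int) = ti by omega]
            exact List.find?_some hfind
          · intro j hj hlt
            rw [List.mem_range] at hj
            have hlast := (find?_reverse_last (PySem.List.pyRange 1 (msgs.length : Int) 1)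
              (PySem.List.pairwise_lt_pyRange_one _ _) ti
              (by rw [← pvRange_rev]; exact hfind)).2.2
            apply hlast
            · rw [PySem.List.mem_pyRange_one]; omega
            · omega
          · rw [List.mem_range]; omega
        rw [hP]
        simp
  
theorem get_preceding_replies_py_changed : Claim_changed_get_preceding_replies_py := by
  unfold Claim_changed_get_preceding_replies_py
  decide

theorem get_preceding_replies_py_tight : Claim_exact_get_preceding_replies_py := by
  intro msgs t maxp hdom hpre hD
  obtain ⟨hmax, tn, htn, htn1, hmatch, hlast, p, hp, hp1, hpt, hel⟩ := hD
  rw [List.mem_range] at htn hp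
  have hfind : (PySem.List.pyRange ((msgs.length : Int) - 1) 0 (-1)).find?
      (fun i => pvTsEq msgs t i) = some (tn : Int) := by
    rw [pvRange_rev]
    apply find?_reverse_of_last _ (PySem.List.pairwise_lt_pyRange_one _ _)
    · rw [PySem.List.mem_pyRange_one]; omega
    · exact hmatch
    · intro j hj hlt
      rw [PySem.List.mem_pyRange_one] at hj
      have hjn : j = ((j.toNat : Nat) : Int) := by omega
      rw [hjn]
      apply hlast
      · rw [List.mem_range]; omega
      · omega
  have h1 : (1:Int) ≤ (tn : Int) := by omega
  have h2 : ((tn : Nat) : Int) < (msgs.length : Int) := by omega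
  have hPne : pvPrec msgs (tn : Int) ≠ [] :=
    pvPrec_ne_nil_of msgs (tn : Int) p hp hp1 (by omega) hel
  rw [pvA_eq msgs t maxp (tn : Int) hfind h1 h2, pvB_eq msgs t maxp (tn : Int) hfind h1 h2]
  rw [if_neg (by omega : ¬ 0 < maxp)]
  intro heq
  have hlen := congrArg List.length heq
  simp only [List.length_append, List.length_drop, List.length_cons, List.length_nil] at hlen
  have hPlen : 1 ≤ (pvPrec msgs (tn : Int)).length := by
    cases hP : pvPrec msgs (tn : Int) with
    | nil => exact absurd hP hPne
    | cons a l => simp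
  have hR : max ((maxp + 1).toNat - 1) 1 = 1 := by omega
  rw [hR] at hlen
  omega
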